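-- pv_equiv track=rewrite | github.com/daniel-reich/turbo-robot | dRjHygERcDJpiDzze_5.py | lengthen
-- ===== SOURCE A (Python) =====
-- def lengthen(s1, s2):
--   a=s1
--   b=s2
--   if len(a)>len(b):
--     x=a
--     y=b
--   else:
--     x=b
--     y=a
--   for i in x:
--     for j in y:
--       if len(x)!=len(y):
--         y+=j
--   return(y)
-- ===== SOURCE B (Python) =====
-- def lengthen(s1, s2):
--     if len(s1) > len(s2):
--         longer, shorter = s1, s2
--     else:
--         longer, shorter = s2, s1
--     if not shorter:
--         return shorter
--     n, m = len(longer), len(shorter)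
--     return ''.join(shorter[i % m] for i in range(n))
-- ===== Notes on version B (the rewrite author's own statement) =====
-- stated objective: faster
-- what changed: B computes each output character directly by modular position in one pass over range(len(longer)) and joins once, instead of A's nested loops repeatedly re-scanning and re-appending to an immutable string.
import Mathlib
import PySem

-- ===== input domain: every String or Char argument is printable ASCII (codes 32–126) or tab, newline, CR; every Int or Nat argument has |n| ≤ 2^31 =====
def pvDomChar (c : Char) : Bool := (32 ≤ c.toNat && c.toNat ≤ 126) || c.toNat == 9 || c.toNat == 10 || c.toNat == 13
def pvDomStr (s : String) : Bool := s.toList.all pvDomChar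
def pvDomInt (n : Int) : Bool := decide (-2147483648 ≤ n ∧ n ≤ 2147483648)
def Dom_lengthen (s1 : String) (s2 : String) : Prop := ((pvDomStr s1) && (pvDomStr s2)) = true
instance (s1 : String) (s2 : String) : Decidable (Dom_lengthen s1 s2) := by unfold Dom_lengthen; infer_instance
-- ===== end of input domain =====

-- B replaces A's nested self-appending loops by a single pass that picks each output
-- character at its modular position in the shorter string (objective: faster, constant-factor).

-- ===== PORT A =====
-- A: pick x = longer, y = shorter (ties: x=s2, y=s1); for each char of x, loop over the
-- CURRENT y (Python's inner `for j in y` iterates the string y was bound to when the inner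
-- loop started, while `y += j` rebinds y), appending j while len(x) != len(y).
def lengthen (s1 : String) (s2 : String) : String :=
  let a := s1.toList
  let b := s2.toList
  let x := if a.length > b.length then a else b
  let y := if a.length > b.length then b else a
  let yfin := x.foldl
    (fun y _ => y.foldl (fun acc j => if x.length ≠ acc.length then acc ++ [j] else acc) y) y
  String.mk yfin

-- ===== PORT B =====
-- B: same longer/shorter selection; empty shorter returned as is; else character i of the
-- result is shorter[i % m] for i in range(n) (i % m < m, so List.getD is exact here).
def lengthen_alt (s1 : String) (s2 : String) : String :=
  let a := s1.toList
  let b := s2.toList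
  let longer := if a.length > b.length then a else b
  let shorter := if a.length > b.length then b else a
  if shorter.isEmpty then String.mk shorter
  else
    let n := longer.length
    let m := shorter.length
    String.mk ((List.range n).map (fun i => shorter.getD (i % m) ' '))

-- ===== PRECONDITION & SPEC =====
def Spec_lengthen (s1 : String) (s2 : String) (out : String) : Prop := out = lengthen_alt s1 s2
instance (s1 : String) (s2 : String) (out : String) : Decidable (Spec_lengthen s1 s2 out) := by unfold Spec_lengthen; infer_instance

-- ===== CLAIM (what is proved, stated in full; the proofs are below) =====
def Claim_equal_lengthen : Prop := ∀ (s1 : String) (s2 : String), Dom_lengthen s1 s2 → Spec_lengthen s1 s2 (lengthen s1 s2)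

-- ===== LEMMAS AND PROOFS =====

-- the tiling of y0 to length n (B's output list)
def tileF (y0 : List Char) (n : Nat) : List Char :=
  (List.range n).map (fun i => y0.getD (i % y0.length) ' ')

@[simp] lemma tileF_length (y0 : List Char) (n : Nat) : (tileF y0 n).length = n := by
  simp [tileF]

lemma tileF_getElem (y0 : List Char) (n i : Nat) (hi : i < n) :
    (tileF y0 n)[i]'(by simpa using hi) = y0.getD (i % y0.length) ' ' := by
  simp [tileF]

-- A's inner loop (fold over a snapshot l, appending while the length differs from n)
lemma foldl_pad (n : Nat) (l : List Char) :
    ∀ (acc : List Char), acc.length ≤ n →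
      l.foldl (fun acc j => if n ≠ acc.length then acc ++ [j] else acc) acc
        = acc ++ l.take (n - acc.length) := by
  induction l with
  | nil => intro acc _; simp
  | cons j rest ih =>
    intro acc hacc
    by_cases h : acc.length = n
    · have h0 : n - acc.length = 0 := by omega
      simp only [List.foldl_cons, h0, List.take_zero, List.append_nil]
      rw [if_neg (by omega)]
      have := ih acc hacc
      rw [this, h0]
      simp
    · have hlt : acc.length < n := by omega
      simp only [List.foldl_cons]
      rw [if_pos (by omega)]
      rw [ih (acc ++ [j]) (by simp; omega)]
      have : n - acc.length = (n - (acc ++ [j]).length) + 1 := by simp; omega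
      rw [this, List.take_succ_cons]
      simp

lemma tileF_self (y0 : List Char) : tileF y0 y0.length = y0 := by
  apply List.ext_getElem (by simp)
  intro i h1 h2
  rw [tileF_getElem _ _ _ (by simpa using h1)]
  rw [Nat.mod_eq_of_lt h2, List.getD_eq_getElem _ _ h2]

-- one outer step preserves the tiling shape: appending take (n - len) of a tile whose
-- length is a multiple of m gives the longer tile
lemma tile_step (y0 : List Char) (n k : Nat) (hm : y0.length ∣ k) (hkn : k ≤ n) :
    tileF y0 k ++ (tileF y0 k).take (n - k) = tileF y0 (k + min (n - k) k) := by
  apply List.ext_getElem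
  · simp [Nat.min_comm]
  · intro i h1 h2
    by_cases hik : i < k
    · rw [List.getElem_append_left (by simpa using hik)]
      rw [tileF_getElem _ _ _ hik, tileF_getElem _ _ _ (by omega)]
    · have hlen : (tileF y0 k).length = k := by simp
      rw [List.getElem_append_right (by simpa using hik)]
      simp only [hlen]
      have hi2 : i - k < min (n - k) k := by
        have : i < k + min (n - k) k := by simpa using h2
        omega
      rw [List.getElem_take, tileF_getElem _ _ _ (by omega), tileF_getElem _ _ _ (by omega)]
      congr 1
      obtain ⟨c, hc⟩ := hm
      subst hc
      conv_rhs => rw [show i = y0.length * c + (i - y0.length * c) by omega]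
      rw [Nat.mul_add_mod]

-- the outer fold: from a tile state of length k (m ∣ k or k = n, m ≤ k ≤ n) with
-- enough iterations left, A's loop reaches the full tile of length n
lemma outer_fold (y0 : List Char) (n : Nat) (hm : y0 ≠ []) :
    ∀ (x : List Char) (k : Nat), (y0.length ∣ k ∨ k = n) → y0.length ≤ k → k ≤ n → n ≤ k + x.length →
      x.foldl (fun y _ =>
          y.foldl (fun acc j => if n ≠ acc.length then acc ++ [j] else acc) y) (tileF y0 k)
        = tileF y0 n := by
  intro x
  induction x with
  | nil =>
    intro k _ _ hle hen
    have : k = n := by simp at hen; omega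
    simp [this]
  | cons c rest ih =>
    intro k hdvd hge hle hen
    have hm0 : 0 < y0.length := List.length_pos_of_ne_nil hm
    simp only [List.foldl_cons]
    rw [foldl_pad n (tileF y0 k) (tileF y0 k) (by simpa using hle)]
    rw [show n - (tileF y0 k).length = n - k by simp]
    by_cases hkn : k = n
    · rw [show n - k = 0 by omega]
      simp only [List.take_zero, List.append_nil]
      exact ih k hdvd hge hle (by simp at hen ⊢; omega)
    · have hdvd' : y0.length ∣ k := by tauto
      rw [tile_step y0 n k hdvd' hle]
      by_cases hdbl : n - k ≤ k
      · rw [show k + min (n - k) k = n by omega]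
        exact ih n (Or.inr rfl) (by omega) le_rfl (by omega)
      · rw [show k + min (n - k) k = k + k by omega]
        exact ih (k + k) (Or.inl (Dvd.dvd.add hdvd' hdvd')) (by omega) (by omega)
          (by simp at hen ⊢; omega)

-- if the start state is empty, A's loop stays empty
lemma outer_fold_nil (n : Nat) (x : List Char) :
    x.foldl (fun y _ =>
        y.foldl (fun acc j => if n ≠ acc.length then acc ++ [j] else acc) y) ([] : List Char)
      = [] := by
  induction x with
  | nil => rfl
  | cons c rest ih => simpa using ih

-- the common core: for x the longer and y the shorter list, A's fold equals B's tile
lemma core (x y : List Char) (hxy : y.length ≤ x.length) :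
    x.foldl (fun y _ =>
        y.foldl (fun acc j => if x.length ≠ acc.length then acc ++ [j] else acc) y) y
      = if y.isEmpty then y
        else (List.range x.length).map (fun i => y.getD (i % y.length) ' ') := by
  by_cases hy : y = []
  · subst hy
    rw [outer_fold_nil x.length x]
    simp
  · rw [if_neg (by simpa using hy)]
    have h1 : y = tileF y y.length := (tileF_self y).symm
    conv_lhs => rw [h1]
    rw [outer_fold y x.length hy x y.length (Or.inl dvd_rfl) le_rfl hxy (by omega)]
    rfl

-- ===== VERDICT (by name: the statement is the Claim_ definition above) =====
theorem lengthen_spec : Claim_equal_lengthen := by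
  intro s1 s2 _
  unfold Spec_lengthen lengthen lengthen_alt
  by_cases h : s1.toList.length > s2.toList.length
  · simp only [if_pos h]
    rw [core _ _ (by omega)]
    by_cases hy : s2.toList.isEmpty
    · simp [hy]
    · simp [hy]
  · simp only [if_neg h]
    rw [core _ _ (by omega)]
    by_cases hy : s1.toList.isEmpty
    · simp [hy]
    · simp [hy]
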